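-- pv_equiv track=rewrite | github.com/CerebriumAI/examples | 12-training/2-unsloth-finetune/evalLLM.py | positional_mirror_cipher
-- ===== SOURCE A (Python) =====
-- import string
--
-- def positional_mirror_cipher(text):
--     alphabet = string.ascii_lowercase
--     mirror = alphabet[::-1]
--     result = []
--
--     for i, char in enumerate(text):
--         if char.lower() in alphabet:
--             is_upper = char.isupper()
--             idx = alphabet.index(char.lower())
--
--             if i % 2 == 0: # Even: Mirror
--                 new_char = mirror[idx]
--             else:          # Odd: Shift +3
--                 new_char = alphabet[(idx + 3) % 26]
--
--             result.append(new_char.upper() if is_upper else new_char)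
--         else:
--             result.append(char)
--
--     return "".join(result)
-- ===== SOURCE B (Python) =====
-- import string
--
-- _LOW = string.ascii_lowercase
-- _UP = string.ascii_uppercase
-- # even positions: alphabet mirror; odd positions: +3 Caesar shift; case preserved,
-- # everything that is not an ASCII letter passes through untouched.
-- _EVEN_MAP = str.maketrans(_LOW + _UP, _LOW[::-1] + _UP[::-1])
-- _ODD_MAP = str.maketrans(_LOW + _UP, _LOW[3:] + _LOW[:3] + _UP[3:] + _UP[:3])
--
--
-- def positional_mirror_cipher(text):
--     even = text[::2].translate(_EVEN_MAP)
--     odd = text[1::2].translate(_ODD_MAP)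
--     out = []
--     for e, o in zip(even, odd):
--         out.append(e)
--         out.append(o)
--     if len(odd) < len(even):
--         out.append(even[-1])
--     return "".join(out)
-- ===== Notes on version B (the rewrite author's own statement) =====
-- stated objective: idiomatic
-- what changed: Replaces A's positional loop with per-character alphabet.index lookups by two precomputed str.translate tables (mirror and +3 shift), applied to the even/odd stride slices of the input and interleaved back.
import Mathlib
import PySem

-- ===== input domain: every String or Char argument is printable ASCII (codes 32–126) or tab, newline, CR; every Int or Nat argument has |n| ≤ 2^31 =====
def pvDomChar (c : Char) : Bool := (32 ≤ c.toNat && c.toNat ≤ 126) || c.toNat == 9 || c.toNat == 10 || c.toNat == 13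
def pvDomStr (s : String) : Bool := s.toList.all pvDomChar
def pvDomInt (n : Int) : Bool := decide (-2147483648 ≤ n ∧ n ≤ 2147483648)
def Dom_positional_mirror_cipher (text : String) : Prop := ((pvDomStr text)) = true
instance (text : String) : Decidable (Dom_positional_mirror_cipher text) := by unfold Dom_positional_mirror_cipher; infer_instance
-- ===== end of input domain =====

-- B replaces A's positional loop (with a linear alphabet.index scan per letter) by two
-- precomputed translation tables applied to the even/odd stride slices, interleaved back (idiomatic).


-- ===== PORT A =====
def pvAlphabet : List Char := "abcdefghijklmnopqrstuvwxyz".toList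

def positional_mirror_cipher (text : String) : String :=
  let alphabet := pvAlphabet
  let mirror := (PySem.List.slice? alphabet none none (-1)).getD []
  let result : List Char :=
    (PySem.List.enumerate text.toList 0).foldl (fun result p =>
      let i := p.1
      let char := p.2
      if PySem.Chars.lowerChar char ∈ alphabet then
        let isUpper := PySem.Chars.isupper char
        let idx := ((PySem.List.index? alphabet (PySem.Chars.lowerChar char)).getD 0 : Nat)
        let newChar :=
          if PySem.Int.mod i 2 == 0 then mirror.getD idx ' '
          else alphabet.getD ((idx + 3) % 26) ' '
        result ++ [if isUpper then PySem.Chars.upperChar newChar else newChar]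
      else
        result ++ [char]) []
  String.ofList result

-- ===== PORT B =====
def pvLow : List Char := "abcdefghijklmnopqrstuvwxyz".toList
def pvUp : List Char := "ABCDEFGHIJKLMNOPQRSTUVWXYZ".toList

-- str.maketrans(_LOW + _UP, _LOW[::-1] + _UP[::-1])
def pvEvenTab : PySem.Dict Char Char :=
  PySem.Dict.ofList ((pvLow ++ pvUp).zip
    (((PySem.List.slice? pvLow none none (-1)).getD []) ++
     ((PySem.List.slice? pvUp none none (-1)).getD [])))

-- str.maketrans(_LOW + _UP, _LOW[3:] + _LOW[:3] + _UP[3:] + _UP[:3])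
def pvOddTab : PySem.Dict Char Char :=
  PySem.Dict.ofList ((pvLow ++ pvUp).zip
    (PySem.List.slice pvLow (some 3) none ++ PySem.List.slice pvLow none (some 3) ++
     PySem.List.slice pvUp (some 3) none ++ PySem.List.slice pvUp none (some 3)))

def positional_mirror_cipher_alt (text : String) : String :=
  let cs := text.toList
  let even := ((PySem.List.slice? cs none none 2).getD []).map
    (fun c => PySem.Dict.getD pvEvenTab c c)
  let odd := ((PySem.List.slice? cs (some 1) none 2).getD []).map
    (fun c => PySem.Dict.getD pvOddTab c c)
  let out := (even.zip odd).foldl (fun out p => out ++ [p.1, p.2]) []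
  let out := if odd.length < even.length then out ++ [(PySem.List.pyGet? even (-1)).getD ' ']
             else out
  String.ofList out

-- ===== PRECONDITION & SPEC =====
def Spec_positional_mirror_cipher (text : String) (out : String) : Prop := out = positional_mirror_cipher_alt text
instance (text : String) (out : String) : Decidable (Spec_positional_mirror_cipher text out) := by unfold Spec_positional_mirror_cipher; infer_instance

-- ===== CLAIM (what is proved, stated in full; the proofs are below) =====
def Claim_equal_positional_mirror_cipher : Prop := ∀ (text : String), Dom_positional_mirror_cipher text → Spec_positional_mirror_cipher text (positional_mirror_cipher text)

-- ===== LEMMAS AND PROOFS =====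

-- A's per-character action at an even / odd position.
def pvStepE (c : Char) : Char :=
  if PySem.Chars.lowerChar c ∈ pvAlphabet then
    let idx := ((PySem.List.index? pvAlphabet (PySem.Chars.lowerChar c)).getD 0 : Nat)
    let nc := ((PySem.List.slice? pvAlphabet none none (-1)).getD []).getD idx ' '
    if PySem.Chars.isupper c then PySem.Chars.upperChar nc else nc
  else c

def pvStepO (c : Char) : Char :=
  if PySem.Chars.lowerChar c ∈ pvAlphabet then
    let idx := ((PySem.List.index? pvAlphabet (PySem.Chars.lowerChar c)).getD 0 : Nat)
    let nc := pvAlphabet.getD ((idx + 3) % 26) ' '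
    if PySem.Chars.isupper c then PySem.Chars.upperChar nc else nc
  else c

-- the common result, position by position ('b' = current position is odd)
def pvSpec : Bool → List Char → List Char
  | _, [] => []
  | b, c :: cs => (if b then pvStepO c else pvStepE c) :: pvSpec (!b) cs

-- every other element, starting with the first
def pvEvens {α : Type} : List α → List α
  | [] => []
  | [a] => [a]
  | a :: _ :: l => a :: pvEvens l

lemma pvEvens_cons {α : Type} (a : α) (l : List α) :
    pvEvens (a :: l) = a :: pvEvens l.tail := by
  cases l <;> rfl

lemma pvFilterMap_even {α : Type} (xs : List α) :
    (List.range ((xs.length + 1) / 2)).filterMap (fun k => xs[2 * k]?) = pvEvens xs := by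
  induction xs using pvEvens.induct with
  | case1 => simp [pvEvens]
  | case2 a => simp [pvEvens]
  | case3 a b l ih =>
    have hlen : ((a :: b :: l).length + 1) / 2 = (l.length + 1) / 2 + 1 := by
      simp [List.length_cons]; omega
    rw [hlen, List.range_succ_eq_map, List.filterMap_cons, List.filterMap_map]
    simp only [pvEvens]
    have : ∀ k : Nat, (a :: b :: l)[2 * (k + 1)]? = l[2 * k]? := by
      intro k
      have : 2 * (k + 1) = (2 * k) + 1 + 1 := by omega
      rw [this]; simp
    simp only [Function.comp_def, this]
    simp [ih]

lemma pvSlice2_none (xs : List Char) :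
    PySem.List.slice? xs none none 2 = some (pvEvens xs) := by
  rw [PySem.List.slice?, PySem.List.sliceIndices]
  simp only [show ¬((2:Int) = 0) by norm_num, if_false, show ¬((2:Int) < 0) by norm_num, if_false]
  have hcount : (if (0:Int) < 2 then if 0 < (xs.length:Int) then (((xs.length:Int) - 0 + 2 - 1) / 2).toNat else 0
          else if (xs.length:Int) < 0 then ((0 - (xs.length:Int) + -2 - 1) / -2).toNat else 0) = (xs.length + 1) / 2 := by
    simp only [show ((0:Int) < 2) = True by simp, if_true]
    split
    · omega
    · omega
  rw [hcount]
  have hidx : ∀ x : Nat, ((0:Int) + 2 * (x:Int)).toNat = 2 * x := by intro x; omega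
  simp only [hidx]
  rw [pvFilterMap_even]

lemma pvSlice2_one (xs : List Char) :
    PySem.List.slice? xs (some 1) none 2 = some (pvEvens xs.tail) := by
  rw [PySem.List.slice?, PySem.List.sliceIndices]
  simp only [show ¬((2:Int) = 0) by norm_num, if_false, show ¬((2:Int) < 0) by norm_num, if_false,
    show ¬((1:Int) < 0) by norm_num]
  cases xs with
  | nil => simp [pvEvens]
  | cons a l =>
    have hstart : min (1:Int) ((a :: l).length : Int) = 1 := by
      simp [List.length_cons]
    rw [hstart]
    have hcount : (if (0:Int) < 2 then if (1:Int) < ((a :: l).length:Int) then ((((a :: l).length:Int) - 1 + 2 - 1) / 2).toNat else 0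
            else if ((a :: l).length:Int) < 1 then ((1 - ((a :: l).length:Int) + -2 - 1) / -2).toNat else 0) = (l.length + 1) / 2 := by
      simp only [show ((0:Int) < 2) = True by simp, if_true, List.length_cons]
      split
      · omega
      · omega
    rw [hcount]
    have hidx : ∀ x : Nat, (a :: l)[((1:Int) + 2 * (x:Int)).toNat]? = l[2 * x]? := by
      intro x
      have : ((1:Int) + 2 * (x:Int)).toNat = 2 * x + 1 := by omega
      rw [this]; simp
    simp only [hidx]
    rw [pvFilterMap_even]
    rfl

-- the translation tables agree with A's per-letter computation on every ASCII character
set_option maxHeartbeats 4000000 in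
set_option maxRecDepth 10000 in
lemma pvTabE_n : ∀ n : Nat, n < 128 →
    PySem.Dict.getD pvEvenTab (Char.ofNat n) (Char.ofNat n) = pvStepE (Char.ofNat n) := by decide

set_option maxHeartbeats 4000000 in
set_option maxRecDepth 10000 in
lemma pvTabO_n : ∀ n : Nat, n < 128 →
    PySem.Dict.getD pvOddTab (Char.ofNat n) (Char.ofNat n) = pvStepO (Char.ofNat n) := by decide

lemma pvTabE (c : Char) (h : pvDomChar c = true) :
    PySem.Dict.getD pvEvenTab c c = pvStepE c := by
  have h128 : c.toNat < 128 := by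
    simp [pvDomChar] at h; omega
  have := pvTabE_n c.toNat h128
  rwa [Char.ofNat_toNat] at this

lemma pvTabO (c : Char) (h : pvDomChar c = true) :
    PySem.Dict.getD pvOddTab c c = pvStepO c := by
  have h128 : c.toNat < 128 := by
    simp [pvDomChar] at h; omega
  have := pvTabO_n c.toNat h128
  rwa [Char.ofNat_toNat] at this

lemma pvFlip (i : Int) : (PySem.Int.mod (i+1) 2 != 0) = !(PySem.Int.mod i 2 != 0) := by
  simp only [PySem.Int.mod, Int.fmod_eq_emod]
  rcases Int.emod_two_eq i with h | h
  · have h2 : (i+1) % 2 = 1 := by omega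
    rw [h, h2]; rfl
  · have h2 : (i+1) % 2 = 0 := by omega
    rw [h, h2]; rfl

lemma pvA_loop (cs : List Char) : ∀ (i : Int) (acc : List Char),
    (PySem.List.enumerate cs i).foldl (fun result p =>
      let i := p.1
      let char := p.2
      if PySem.Chars.lowerChar char ∈ pvAlphabet then
        let isUpper := PySem.Chars.isupper char
        let idx := ((PySem.List.index? pvAlphabet (PySem.Chars.lowerChar char)).getD 0 : Nat)
        let newChar :=
          if PySem.Int.mod i 2 == 0 then ((PySem.List.slice? pvAlphabet none none (-1)).getD []).getD idx ' '
          else pvAlphabet.getD ((idx + 3) % 26) ' '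
        result ++ [if isUpper then PySem.Chars.upperChar newChar else newChar]
      else
        result ++ [char]) acc = acc ++ pvSpec (PySem.Int.mod i 2 != 0) cs := by
  induction cs with
  | nil => intro i acc; simp [pvSpec, PySem.List.enumerate_nil]
  | cons c cs ih =>
    intro i acc
    rw [PySem.List.enumerate_cons, List.foldl_cons, ih, pvFlip]
    simp only [pvSpec]
    by_cases hb : PySem.Int.mod i 2 == 0
    · have hb' : (PySem.Int.mod i 2 != 0) = false := by simp [bne]; simpa using hb
      have hm0 : i % 2 = 0 := by simpa [PySem.Int.mod, Int.fmod_eq_emod] using hb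
      have hd : 2 ∣ i := Int.dvd_of_emod_eq_zero hm0
      simp only [hb', Bool.false_eq_true, if_false]
      by_cases hm : PySem.Chars.lowerChar c ∈ pvAlphabet <;>
        simp [hm, hd, pvStepE, List.append_assoc]
    · have hb' : (PySem.Int.mod i 2 != 0) = true := by simp [bne]; simpa using hb
      have hm0 : ¬ i % 2 = 0 := by simpa [PySem.Int.mod, Int.fmod_eq_emod] using hb
      have hd : ¬ 2 ∣ i := fun h => hm0 (Int.emod_eq_zero_of_dvd h)
      simp only [hb', if_true]
      by_cases hm : PySem.Chars.lowerChar c ∈ pvAlphabet <;>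
        simp [hm, hd, pvStepO, List.append_assoc]

lemma pvA_eq (text : String) :
    positional_mirror_cipher text = String.ofList (pvSpec false text.toList) := by
  show String.ofList _ = _
  rw [pvA_loop]
  rfl

lemma pvGetNegOne {α : Type} (xs : List α) : PySem.List.pyGet? xs (-1) = xs.getLast? := by
  cases xs with
  | nil => rfl
  | cons a l =>
    simp [PySem.List.pyGet?, PySem.List.pyIdx?, List.getLast?_eq_getElem?]

set_option maxRecDepth 4000 in
lemma pvMerge (cs : List Char) (h : cs.all pvDomChar = true) :
    (let e := (pvEvens cs).map (fun c => PySem.Dict.getD pvEvenTab c c)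
     let o := (pvEvens cs.tail).map (fun c => PySem.Dict.getD pvOddTab c c)
     let out := (e.zip o).foldl (fun out p => out ++ [p.1, p.2]) []
     if o.length < e.length then out ++ [(PySem.List.pyGet? e (-1)).getD ' '] else out)
      = pvSpec false cs := by
  induction cs using pvEvens.induct with
  | case1 => rfl
  | case2 a =>
    simp only [List.all_cons, Bool.and_eq_true] at h
    simp [pvEvens, pvSpec, pvGetNegOne, pvTabE a h.1]
  | case3 a b l ih =>
    simp only [List.all_cons, Bool.and_eq_true] at h
    specialize ih h.2.2
    simp only [pvEvens, List.tail_cons, List.map_cons] at ih ⊢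
    rw [pvEvens_cons b l]
    simp only [List.map_cons, List.zip_cons_cons, List.foldl_cons, List.nil_append]
    have hflat : ∀ (L : List (Char × Char)) (init : List Char),
        L.foldl (fun out p => out ++ [p.1, p.2]) init = init ++ L.flatMap (fun p => [p.1, p.2]) := by
      intro L
      induction L with
      | nil => intro init; simp
      | cons p L ihL => intro init; simp [ihL, List.flatMap_cons]
    rw [hflat] at ih
    rw [hflat]
    simp only [List.nil_append] at ih
    simp only [List.length_cons, pvSpec, Bool.not_false, Bool.not_true, Bool.false_eq_true,
      if_false, if_true, pvTabE a h.1, pvTabO b h.2.1]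
    split_ifs with hc
    · have hc' : (List.map (fun c => pvOddTab.getD c c) (pvEvens l.tail)).length <
          (List.map (fun c => pvEvenTab.getD c c) (pvEvens l)).length := by omega
      rw [if_pos hc'] at ih
      have hne : (List.map (fun c => pvEvenTab.getD c c) (pvEvens l)) ≠ [] := by
        intro hnil; rw [hnil] at hc'; simp at hc'
      rw [pvGetNegOne] at ih ⊢
      obtain ⟨x, xs, hxl⟩ : ∃ x xs, List.map (fun c => pvEvenTab.getD c c) (pvEvens l) = x :: xs :=
        by rcases hm : List.map (fun c => pvEvenTab.getD c c) (pvEvens l) with _ | ⟨x, xs⟩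
           · exact absurd hm hne
           · exact ⟨x, xs, rfl⟩
      rw [hxl] at ih ⊢
      rw [List.getLast?_cons_cons]
      rw [← ih]
      simp
    · have hc' : ¬ ((List.map (fun c => pvOddTab.getD c c) (pvEvens l.tail)).length <
          (List.map (fun c => pvEvenTab.getD c c) (pvEvens l)).length) := by omega
      rw [if_neg hc'] at ih
      rw [← ih]
      simp

lemma pvB_eq (text : String) (h : pvDomStr text = true) :
    positional_mirror_cipher_alt text = String.ofList (pvSpec false text.toList) := by
  show String.ofList _ = _
  rw [pvSlice2_none, pvSlice2_one]
  simp only [Option.getD_some]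
  rw [pvMerge text.toList h]

-- ===== VERDICT (by name: the statement is the Claim_ definition above) =====
theorem positional_mirror_cipher_spec : Claim_equal_positional_mirror_cipher := by
  intro text hdom
  unfold Spec_positional_mirror_cipher
  rw [pvA_eq, pvB_eq text hdom]
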